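-- pv_equiv track=rewrite | github.com/MrSingh3131/Foobar | Questions I attempted/Lovely Lucky Lambs.py | solution
-- ===== SOURCE A (Python) =====
-- def solution(total_lambs):
--     # Your code here
--
--     def stingy(total_lambs):
--         n,total = 0,1
--         count = 0
--         while (total_lambs >0):
--             n,total = total,total+n
--             count+=1
--             total_lambs -= total
--
--         return count
--
--     def gen(total_lambs):
--         i=1
--         count = 0
--         while total_lambs > 0:
--             i *= 2
--             total_lambs -= i
--             count +=1
--         return count
--
--     return (stingy(total_lambs)-gen(total_lambs))
-- ===== SOURCE B (Python) =====
-- def solution(total_lambs):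
--     n = total_lambs
--     # stingy: count Fibonacci payouts 1,2,3,5,... until the cumulative sum reaches n
--     x, y, s, k = 1, 2, 0, 0
--     while s < n:
--         s, x, y, k = s + x, y, x + y, k + 1
--     # generous payouts are 2,4,8,...: after g terms the sum is 2^(g+1)-2,
--     # so the count is the closed form (n+1).bit_length()-1 for n > 0
--     g = 0 if n <= 0 else (n + 1).bit_length() - 1
--     return k - g
-- ===== Notes on version B (the rewrite author's own statement) =====
-- stated objective: simpler
-- what changed: The generous powers-of-two loop is replaced by the closed form (n+1).bit_length()-1, and the stingy loop is restructured to accumulate the Fibonacci payout sum forward instead of decrementing the remaining lamb count through a re-paired state.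
import Mathlib
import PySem

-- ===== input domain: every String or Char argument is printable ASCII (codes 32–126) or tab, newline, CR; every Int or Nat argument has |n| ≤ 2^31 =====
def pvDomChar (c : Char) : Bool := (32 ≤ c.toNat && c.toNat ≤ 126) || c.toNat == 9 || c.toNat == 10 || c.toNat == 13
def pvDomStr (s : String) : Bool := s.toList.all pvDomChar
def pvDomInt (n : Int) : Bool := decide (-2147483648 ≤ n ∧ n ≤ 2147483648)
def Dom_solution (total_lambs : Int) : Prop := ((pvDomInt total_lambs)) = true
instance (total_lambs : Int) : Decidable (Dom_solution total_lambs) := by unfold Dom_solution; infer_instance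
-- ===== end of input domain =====

-- B replaces the generous powers-of-two loop by the closed form (n+1).bit_length()-1 and
-- accumulates the stingy Fibonacci sum forward instead of decrementing the remainder (simpler).

-- ===== PORT A =====
-- stingy's while loop; the inner `if 0 < total + n` is a termination guard only
-- (in every call reached from `solution` it holds, since total ≥ 1 and n ≥ 0).
def stingyLoopA (n total count lambs : Int) : Int :=
  if _h1 : 0 < lambs then
    if _h2 : 0 < total + n then
      stingyLoopA total (total + n) (count + 1) (lambs - (total + n))
    else count
  else count
termination_by lambs.toNat
decreasing_by omega

-- gen's while loop; `0 < i` is likewise only a termination guard (i starts at 1 and doubles).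
def genLoopA (i count lambs : Int) : Int :=
  if _h1 : 0 < lambs then
    if _h2 : 0 < i then
      genLoopA (i * 2) (count + 1) (lambs - i * 2)
    else count
  else count
termination_by lambs.toNat
decreasing_by omega

def solution (total_lambs : Int) : Int :=
  stingyLoopA 0 1 0 total_lambs - genLoopA 1 0 total_lambs

-- ===== PORT B =====
-- B's forward loop: s is the cumulative Fibonacci sum, x the next payout;
-- `0 < x` is a termination guard only (x starts at 1 and grows).
def stingyLoopB (x y s k n0 : Int) : Int :=
  if _h1 : s < n0 then
    if _h2 : 0 < x then
      stingyLoopB y (x + y) (s + x) (k + 1) n0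
    else k
  else k
termination_by (n0 - s).toNat
decreasing_by omega

def solution_alt (total_lambs : Int) : Int :=
  let n := total_lambs
  let k := stingyLoopB 1 2 0 0 n
  let g : Int := if n ≤ 0 then 0 else (PySem.Int.bitLength (n + 1) : Int) - 1
  k - g

-- ===== PRECONDITION & SPEC =====
def Spec_solution (total_lambs : Int) (out : Int) : Prop := out = solution_alt total_lambs
instance (total_lambs : Int) (out : Int) : Decidable (Spec_solution total_lambs out) := by unfold Spec_solution; infer_instance

-- ===== CLAIM (what is proved, stated in full; the proofs are below) =====
def Claim_equal_solution : Prop := ∀ (total_lambs : Int), Dom_solution total_lambs → Spec_solution total_lambs (solution total_lambs)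

-- ===== LEMMAS AND PROOFS =====

-- A's stingy loop simulates B's forward loop: x = n + total, y = n + 2*total, lambs = n0 - s.
lemma stingy_sim : ∀ (m : Nat) (n total count lambs s n0 : Int),
    lambs.toNat ≤ m → lambs = n0 - s →
    stingyLoopA n total count lambs = stingyLoopB (n + total) (n + 2 * total) s count n0 := by
  intro m
  induction m with
  | zero =>
    intro n total count lambs s n0 hm hl
    conv_lhs => rw [stingyLoopA]
    conv_rhs => rw [stingyLoopB]
    have h1 : ¬ 0 < lambs := by omega
    have h2 : ¬ s < n0 := by omega
    simp [h1, h2]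
  | succ m ih =>
    intro n total count lambs s n0 hm hl
    conv_lhs => rw [stingyLoopA]
    conv_rhs => rw [stingyLoopB]
    by_cases h1 : 0 < lambs
    · have h1' : s < n0 := by omega
      by_cases h2 : 0 < total + n
      · have h2' : 0 < n + total := by omega
        simp only [h1, h1', h2, h2', dif_pos]
        rw [ih total (total + n) (count + 1) (lambs - (total + n)) (s + (n + total)) n0
          (by omega) (by omega)]
        congr 1 <;> ring
      · have h2' : ¬ 0 < n + total := by omega
        simp [h1, h1', h2, h2']
    · have h1' : ¬ s < n0 := by omega
      simp [h1, h1']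

-- genLoopA is affine in its count argument.
lemma genA_shift : ∀ (m : Nat) (i c lambs : Int), lambs.toNat ≤ m →
    genLoopA i c lambs = c + genLoopA i 0 lambs := by
  intro m
  induction m with
  | zero =>
    intro i c lambs hm
    have h1 : ¬ 0 < lambs := by omega
    conv_lhs => rw [genLoopA]
    conv_rhs => rw [genLoopA]
    simp [h1]
  | succ m ih =>
    intro i c lambs hm
    conv_lhs => rw [genLoopA]
    conv_rhs => rw [genLoopA]
    by_cases h1 : 0 < lambs
    · by_cases h2 : 0 < i
      · simp only [h1, h2, dif_pos]
        rw [ih (i * 2) (c + 1) (lambs - i * 2) (by omega),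
            ih (i * 2) (0 + 1) (lambs - i * 2) (by omega)]
        ring
      · simp [h1, h2]
    · simp [h1]

-- Doubling the step of genLoopA halves (with ceiling) the remaining lamb count.
lemma genA_scale : ∀ (m : Nat) (i c lambs : Int), lambs.toNat ≤ m → 0 < i →
    genLoopA (2 * i) c lambs = genLoopA i c ((lambs + 1) / 2) := by
  intro m
  induction m with
  | zero =>
    intro i c lambs hm hi
    have h1 : ¬ 0 < lambs := by omega
    have h2 : ¬ 0 < (lambs + 1) / 2 := by omega
    conv_lhs => rw [genLoopA]
    conv_rhs => rw [genLoopA]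
    simp [h1, h2]
  | succ m ih =>
    intro i c lambs hm hi
    conv_lhs => rw [genLoopA]
    conv_rhs => rw [genLoopA]
    by_cases h1 : 0 < lambs
    · have h1' : 0 < (lambs + 1) / 2 := by omega
      have h2 : 0 < 2 * i := by omega
      simp only [h1, h1', h2, hi, dif_pos]
      have h3 := ih (2 * i) (c + 1) (lambs - 2 * (2 * i)) (by omega) (by omega)
      rw [show (2:Int) * i * 2 = 2 * (2 * i) by ring, h3,
          show (2:Int) * i = i * 2 by ring]
      congr 1
      omega
    · have h1' : ¬ 0 < (lambs + 1) / 2 := by omega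
      simp [h1, h1']

-- B's closed form for the generous count.
def genB (n : Int) : Int := if n ≤ 0 then 0 else (PySem.Int.bitLength (n + 1) : Int) - 1

-- The closed form satisfies the halving recurrence of the loop.
lemma genB_rec (n : Int) (hn : 0 < n) : genB n = 1 + genB ((n - 1) / 2) := by
  unfold genB
  have hstep : PySem.Int.bitLength (n + 1) =
      PySem.Int.bitLength (PySem.Int.floordiv (n + 1) 2) + 1 :=
    PySem.Int.bitLength_of_pos (by omega)
  have hfd : PySem.Int.floordiv (n + 1) 2 = (n + 1) / 2 :=
    PySem.Int.floordiv_eq_ediv_of_pos (by omega)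
  by_cases h2 : (n - 1) / 2 ≤ 0
  · -- n = 1 or n = 2 : bitLength (n+1) = 2
    have hhalf : (n + 1) / 2 = 1 := by omega
    rw [hstep, hfd, hhalf]
    have hb1 : PySem.Int.bitLength 1 = 1 := by decide
    simp only [show ¬ n ≤ 0 by omega, if_neg, if_pos h2, hb1, not_false_iff]
    norm_num
  · have hhalf : (n - 1) / 2 + 1 = (n + 1) / 2 := by omega
    simp only [show ¬ n ≤ 0 by omega, h2, if_neg, not_false_iff]
    rw [hstep, hfd, ← hhalf]
    push_cast
    ring

-- A's gen loop equals B's closed form.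
lemma gen_eq : ∀ (m : Nat) (lambs : Int), lambs.toNat ≤ m →
    genLoopA 1 0 lambs = genB lambs := by
  intro m
  induction m with
  | zero =>
    intro lambs hm
    rw [genLoopA]
    have h1 : ¬ 0 < lambs := by omega
    simp [h1, genB, show lambs ≤ 0 by omega]
  | succ m ih =>
    intro lambs hm
    by_cases h1 : 0 < lambs
    · conv_lhs => rw [genLoopA]
      simp only [h1, show (0:Int) < 1 by norm_num, dif_pos, one_mul]
      rw [genA_shift (m + 1) 2 (0 + 1) (lambs - 2) (by omega)]
      have hsc := genA_scale (m + 1) 1 0 (lambs - 2) (by omega) (by omega)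
      rw [show (2:Int) * 1 = 2 by norm_num, show (lambs - 2 + 1) / 2 = (lambs - 1) / 2 by omega] at hsc
      rw [hsc, ih ((lambs - 1) / 2) (by omega)]
      rw [genB_rec lambs h1]
      ring
    · rw [genLoopA]
      simp [h1, genB, show lambs ≤ 0 by omega]

-- ===== VERDICT (by name: the statement is the Claim_ definition above) =====
theorem solution_spec : Claim_equal_solution := by
  intro n _
  unfold Spec_solution solution solution_alt
  have hst : stingyLoopA 0 1 0 n = stingyLoopB 1 2 0 0 n := by
    have := stingy_sim n.toNat 0 1 0 (n - 0) 0 n (by omega) (by omega)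
    simpa using this
  have hg : genLoopA 1 0 n = genB n := gen_eq n.toNat n (by omega)
  simp only [hst, hg, genB]
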